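-- pv_equiv track=rewrite | github.com/KirillNN/Python_Codewars | 7kyu/Parts of a list.py | partlist
-- ===== SOURCE A (Python) =====
-- def partlist(arr):
--     result = []
--     for i in range(len(arr) - 1):
--         part = (
--             "{}".format(*[' '.join(arr[:i + 1])]),
--             "{}".format(*[' '.join(arr[i + 1:])])
--         )
--         result.append(part)
--     return result
-- ===== SOURCE B (Python) =====
-- def partlist(arr):
--     # backward pass: suffixes[i] == ' '.join(arr[i:])
--     suffixes = []
--     acc = None
--     for x in reversed(arr):
--         acc = x if acc is None else x + ' ' + acc
--         suffixes.append(acc)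
--     suffixes.reverse()
--     # forward pass with a running prefix accumulator
--     result = []
--     prefix = None
--     for x, suf in zip(arr, suffixes[1:]):
--         prefix = x if prefix is None else prefix + ' ' + x
--         result.append((prefix, suf))
--     return result
-- ===== Notes on version B (the rewrite author's own statement) =====
-- stated objective: alternative
-- what changed: A re-joins both slices arr[:i+1] and arr[i+1:] from scratch for every split point; B makes one backward pass building a suffix-join table and one forward pass threading a running prefix accumulator, never slicing or re-joining.
import Mathlib
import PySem

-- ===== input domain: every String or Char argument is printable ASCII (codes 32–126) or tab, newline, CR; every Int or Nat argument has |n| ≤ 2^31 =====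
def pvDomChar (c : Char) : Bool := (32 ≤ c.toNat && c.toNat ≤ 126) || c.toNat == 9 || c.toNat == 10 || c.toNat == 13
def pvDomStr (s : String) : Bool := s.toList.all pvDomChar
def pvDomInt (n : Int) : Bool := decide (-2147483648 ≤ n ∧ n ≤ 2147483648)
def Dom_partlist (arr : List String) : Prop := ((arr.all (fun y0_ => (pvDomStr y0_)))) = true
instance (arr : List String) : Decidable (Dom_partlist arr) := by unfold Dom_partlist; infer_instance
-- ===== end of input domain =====

-- B replaces A's per-split re-joining of both slices by a backward suffix-table pass plus a
-- forward running-prefix pass; same return value, both total, no side effects.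

-- ===== PORT A =====
-- "{}".format(s) on a str s is s itself, so each component is the ' '-join of the slice.
def partlist (arr : List String) : List (String × String) :=
  (PySem.List.pyRange 0 ((arr.length : Int) - 1) 1).foldl
    (fun result i =>
      result ++ [ (PySem.Str.join " " (PySem.List.slice arr none (some (i + 1))),
                   PySem.Str.join " " (PySem.List.slice arr (some (i + 1)) none)) ])
    []

-- ===== PORT B =====
-- Python's str '+' (exact: concatenation of the code points)
def strCat (a b : String) : String := String.ofList (a.toList ++ b.toList)

-- body of B's backward loop: acc = x if acc is None else x + ' ' + acc; suffixes.append(acc)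
def sufStep (st : Option String × List String) (x : String) : Option String × List String :=
  let a := match st.1 with
    | none => x
    | some s => strCat (strCat x " ") s
  (some a, st.2 ++ [a])

-- body of B's forward loop: prefix = x if prefix is None else prefix + ' ' + x; result.append((prefix, suf))
def preStep (st : Option String × List (String × String)) (p : String × String) :
    Option String × List (String × String) :=
  let pr := match st.1 with
    | none => p.1
    | some q => strCat (strCat q " ") p.1
  (some pr, st.2 ++ [(pr, p.2)])

def partlist_alt (arr : List String) : List (String × String) :=
  let suffixes := ((arr.reverse.foldl sufStep (none, [])).2).reverse
  ((arr.zip (PySem.List.slice suffixes (some 1) none)).foldl preStep (none, [])).2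

-- ===== PRECONDITION & SPEC =====
def Spec_partlist (arr : List String) (out : List (String × String)) : Prop := out = partlist_alt arr
instance (arr : List String) (out : List (String × String)) : Decidable (Spec_partlist arr out) := by unfold Spec_partlist; infer_instance

-- ===== CLAIM (what is proved, stated in full; the proofs are below) =====
def Claim_equal_partlist : Prop := ∀ (arr : List String), Dom_partlist arr → Spec_partlist arr (partlist arr)

-- ===== LEMMAS AND PROOFS =====

def J (l : List String) : String := PySem.Str.join " " l
def specPL (pre : String) (rest : List String) : List (String × String) :=
  match rest with
  | [] => []
  | x :: xs => (pre, J (x :: xs)) :: specPL (strCat (strCat pre " ") x) xs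
def sufs : List String → List String
  | [] => []
  | x :: xs =>
    match sufs xs with
    | [] => [x]
    | s :: t => strCat (strCat x " ") s :: s :: t
theorem toList_strCat (a b : String) : (strCat a b).toList = a.toList ++ b.toList := by
  simp [strCat]
theorem J_singleton (p : String) : J [p] = p := by
  apply String.ext_iff.mpr; simp [J, PySem.Chars.join_singleton]
theorem J_cons_cons (p q : String) (l : List String) :
    J (p :: q :: l) = strCat (strCat p " ") (J (q :: l)) := by
  apply String.ext_iff.mpr; simp [J, toList_strCat, PySem.Chars.join_cons_cons]
theorem J_cat_cons (p x : String) (l : List String) :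
    J (strCat (strCat p " ") x :: l) = J (p :: x :: l) := by
  cases l with
  | nil => rw [J_singleton, J_cons_cons, J_singleton]
  | cons y s =>
    rw [J_cons_cons, J_cons_cons p x, J_cons_cons x y]
    apply String.ext_iff.mpr; simp [toList_strCat]

set_option maxHeartbeats 1000000 in
theorem specPL_eq_map (l : List String) (p : String) :
    specPL p l
      = (List.range l.length).map (fun k => (J (p :: l.take k), J (l.drop k))) := by
  induction l generalizing p with
  | nil => rfl
  | cons x t ih =>
    simp only [specPL]
    rw [ih]
    rw [List.length_cons, List.range_succ_eq_map, List.map_cons, List.map_map]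
    rw [List.take_zero, List.drop_zero]
    rw [J_singleton]
    refine congrArg (List.cons (p, J (x :: t))) ?_
    refine List.map_congr_left (fun k _ => ?_)
    simp only [Function.comp_apply, List.take_succ_cons, List.drop_succ_cons]
    rw [J_cat_cons]


theorem sufs_cons (x : String) (xs : List String) :
    sufs (x :: xs) = J (x :: xs) :: sufs xs := by
  induction xs generalizing x with
  | nil => simp [sufs, J_singleton]
  | cons y s ih => rw [sufs, ih y]; rw [J_cons_cons]

theorem suf_fold (l : List String) :
    l.reverse.foldl sufStep (none, []) = ((sufs l).head?, (sufs l).reverse) := by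
  induction l with
  | nil => rfl
  | cons x xs ih =>
    rw [List.reverse_cons, List.foldl_append, ih]
    cases h : sufs xs with
    | nil => simp [sufStep, sufs, h]
    | cons s t => simp [sufStep, sufs, h]

theorem pre_fold (t : List String) :
    ∀ (x p : String) (acc : List (String × String)),
      (((x :: t).zip (sufs t)).foldl preStep (some p, acc)).2
        = acc ++ specPL (strCat (strCat p " ") x) t := by
  induction t with
  | nil => intro x p acc; simp [sufs, specPL]
  | cons y s ih =>
    intro x p acc
    rw [sufs_cons]
    simp only [List.zip_cons_cons, List.foldl_cons]
    have hstep : preStep (some p, acc) (x, J (y :: s))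
        = (some (strCat (strCat p " ") x),
           acc ++ [(strCat (strCat p " ") x, J (y :: s))]) := rfl
    rw [hstep, ih y (strCat (strCat p " ") x)]
    simp [specPL]

theorem pre_fold_none (x : String) (t : List String) :
    (((x :: t).zip (sufs t)).foldl preStep (none, [])).2 = specPL x t := by
  cases t with
  | nil => rfl
  | cons y s =>
    rw [sufs_cons]
    simp only [List.zip_cons_cons, List.foldl_cons]
    have hstep : preStep ((none : Option String), ([] : List (String × String))) (x, J (y :: s))
        = (some x, [(x, J (y :: s))]) := rfl
    rw [hstep, pre_fold s y x]
    simp [specPL]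

theorem alt_cons (x : String) (t : List String) : partlist_alt (x :: t) = specPL x t := by
  simp only [partlist_alt, suf_fold, List.reverse_reverse, PySem.List.slice_from_one,
    sufs_cons, List.tail_cons]
  exact pre_fold_none x t
theorem a_eq_map (arr : List String) :
    partlist arr
      = (List.range (arr.length - 1)).map
          (fun k => (J (arr.take (k + 1)), J (arr.drop (k + 1)))) := by
  unfold partlist
  rw [PySem.List.foldl_append_singleton_eq_map
    (fun i => (PySem.Str.join " " (PySem.List.slice arr none (some (i + 1))),
               PySem.Str.join " " (PySem.List.slice arr (some (i + 1)) none)))]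
  rw [PySem.List.pyRange_one, List.map_map, List.nil_append]
  have hn : (((arr.length : Int) - 1) - 0).toNat = arr.length - 1 := by omega
  rw [hn]
  refine List.map_congr_left (fun k _ => ?_)
  have h1 : (0 : Int) + (k : Int) + 1 = ((k + 1 : Nat) : Int) := by push_cast; ring
  simp only [Function.comp_apply, h1, J]
  rw [PySem.List.slice_to arr (by positivity), PySem.List.slice_from arr (by positivity),
    Int.toNat_natCast]

theorem partlist_eq_alt (arr : List String) : partlist arr = partlist_alt arr := by
  rw [a_eq_map]
  cases arr with
  | nil => rfl
  | cons x t =>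
    rw [alt_cons, specPL_eq_map]
    simp only [List.length_cons, Nat.add_sub_cancel]
    refine List.map_congr_left (fun k _ => ?_)
    simp only [List.take_succ_cons, List.drop_succ_cons]

-- ===== VERDICT (by name: the statement is the Claim_ definition above) =====
theorem partlist_spec : Claim_equal_partlist := by
  intro arr _
  unfold Spec_partlist
  exact partlist_eq_alt arr
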